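-- pv_equiv track=rewrite | github.com/lilgmills/DNDStatRankCalculator | trials.py | obtain_best_candidate
-- ===== SOURCE A (Python) =====
-- def new_master_list(list_of_candidates):
--     new_masterlist = []
--     for candidate in list_of_candidates:
--         new_masterlist.extend(candidate)
--
--     return new_masterlist
--
-- def max_stat(stat_rolls):
--     master = new_master_list(stat_rolls)
--
--     try: return max(master)
--     except: return
--
-- def obtain_best_candidate(stat_rolls):
--     #requirements:
--     #contains the max stat
--     #obtains the lowest sum of remaining entries
--
--     lowest_remaining_sum = None
--     obtains_max = []            #list of indices and stat roll candidates that meet the max condition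
--     remaining_sums = []
--     idxs = []
--
--     current_max = max_stat(stat_rolls)
--
--     for i, rolls in enumerate(stat_rolls):
--         rolls_set = set(rolls)
--         if current_max in rolls_set:
--             obtains_max.append([i, rolls])
--
--             sorted_rolls = rolls[::]
--             sorted_rolls.sort()
--
--             del sorted_rolls[-1]
--
--             remaining_sum = sum(sorted_rolls)
--             remaining_sums.append(remaining_sum)
--
--             idxs.append(i)
--
--             if lowest_remaining_sum is None:
--                 lowest_remaining_sum = remaining_sum
--             elif remaining_sum < lowest_remaining_sum:
--                 lowest_remaining_sum = remaining_sum
--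
--     for i, candidate in enumerate(obtains_max):
--         if remaining_sums[i] == lowest_remaining_sum:
--             at_idx = idxs[i]
--             return at_idx, stat_rolls[at_idx]
-- ===== SOURCE B (Python) =====
-- def obtain_best_candidate(stat_rolls):
--     flat = [x for rolls in stat_rolls for x in rolls]
--     if not flat:
--         return None
--     m = max(flat)
--     qualifying = [(sum(rolls) - m, i) for i, rolls in enumerate(stat_rolls) if m in rolls]
--     qualifying.sort(key=lambda e: e[0])
--     best = qualifying[0]
--     return best[1], stat_rolls[best[1]]
-- ===== Notes on version B (the rewrite author's own statement) =====
-- stated objective: alternative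
-- what changed: Replaces A's parallel arrays (obtains_max/remaining_sums/idxs) with running minimum and a second indexed rescan by one comprehension of (remaining_sum, index) pairs -- remaining sum computed as sum(rolls)-max instead of copy-sort-delete-last -- followed by a single stable sort on remaining sum, returning the first element.
import Mathlib
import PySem

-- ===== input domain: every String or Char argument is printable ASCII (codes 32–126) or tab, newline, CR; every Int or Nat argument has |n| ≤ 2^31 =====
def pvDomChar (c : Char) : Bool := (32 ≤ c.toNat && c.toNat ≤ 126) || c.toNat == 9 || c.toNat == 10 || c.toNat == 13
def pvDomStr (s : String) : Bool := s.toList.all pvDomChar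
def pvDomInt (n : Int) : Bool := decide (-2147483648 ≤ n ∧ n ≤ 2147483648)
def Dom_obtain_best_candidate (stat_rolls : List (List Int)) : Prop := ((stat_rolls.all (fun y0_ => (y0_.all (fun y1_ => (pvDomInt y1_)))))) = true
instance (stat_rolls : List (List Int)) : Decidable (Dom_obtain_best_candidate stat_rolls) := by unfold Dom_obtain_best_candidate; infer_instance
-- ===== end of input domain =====

-- B replaces A's parallel arrays + running-min + indexed rescan by one (sum-max, index)
-- comprehension and a single stable sort on remaining sum, taking the first element (alternative decomposition).


-- ===== PORT A =====
def new_master_list (list_of_candidates : List (List Int)) : List Int :=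
  list_of_candidates.foldl (fun acc candidate => acc ++ candidate) []

def max_stat (stat_rolls : List (List Int)) : Option Int :=
  PySem.List.max? (new_master_list stat_rolls) (fun x => x)   -- max(master); none = ValueError caught, Python returns None

-- one iteration of A's first loop; state = (lowest_remaining_sum, obtains_max, remaining_sums, idxs)
def obcStep (current_max : Option Int)
    (st : Option Int × List (Int × List Int) × List Int × List Int)
    (p : Int × List Int) : Option Int × List (Int × List Int) × List Int × List Int :=
  if (match current_max with
      | none => false                                          -- 'None in rolls_set' is False
      | some m => decide (m ∈ (PySem.Set.ofList p.2 : PySem.Set Int))) then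
    -- rolls[::].sort(); del sorted_rolls[-1]  (p.2 ≠ [] here since current_max ∈ p.2, so dropLast is exact)
    let remaining_sum := ((PySem.List.sorted p.2 (fun x => x) false).dropLast).sum
    let lowest := match st.1 with
      | none => some remaining_sum
      | some v => if remaining_sum < v then some remaining_sum else some v
    (lowest, st.2.1 ++ [p], st.2.2.1 ++ [remaining_sum], st.2.2.2 ++ [p.1])
  else st

-- A's second loop: for i, candidate in enumerate(obtains_max): if remaining_sums[i] == lowest: return idxs[i], stat_rolls[idxs[i]]
def obcLoop2 (stat_rolls : List (List Int)) (remaining_sums idxs : List Int)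
    (lowest : Option Int) : List (Int × (Int × List Int)) → Option (Int × List Int)
  | [] => none
  | (i, _) :: rest =>
    if some (PySem.List.pyGetD remaining_sums i 0) = lowest then
      some (PySem.List.pyGetD idxs i 0,
            PySem.List.pyGetD stat_rolls (PySem.List.pyGetD idxs i 0) [])  -- in range whenever reached
    else obcLoop2 stat_rolls remaining_sums idxs lowest rest

def obtain_best_candidate (stat_rolls : List (List Int)) : Option (Int × List Int) :=
  let current_max := max_stat stat_rolls
  let st := (PySem.List.enumerate stat_rolls 0).foldl (obcStep current_max) (none, [], [], [])
  obcLoop2 stat_rolls st.2.2.1 st.2.2.2 st.1 (PySem.List.enumerate st.2.1 0)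

-- ===== PORT B =====
def obtain_best_candidate_alt (stat_rolls : List (List Int)) : Option (Int × List Int) :=
  let flat := stat_rolls.flatMap (fun rolls => rolls)
  match flat with
  | [] => none
  | x :: t =>
    let m := t.foldl max x                                    -- max(flat), flat nonempty
    let qualifying := (PySem.List.enumerate stat_rolls 0).foldl
      (fun acc p => if m ∈ p.2 then acc ++ [(p.2.sum - m, p.1)] else acc) []
    match PySem.List.sorted qualifying (fun e => e.1) false with
    | [] => none                                              -- unreachable: m came from some rolls
    | best :: _ => some (best.2, PySem.List.pyGetD stat_rolls best.2 [])  -- in range whenever reached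

-- ===== PRECONDITION & SPEC =====
def Spec_obtain_best_candidate (stat_rolls : List (List Int)) (out : Option (Int × List Int)) : Prop := out = obtain_best_candidate_alt stat_rolls
instance (stat_rolls : List (List Int)) (out : Option (Int × List Int)) : Decidable (Spec_obtain_best_candidate stat_rolls out) := by unfold Spec_obtain_best_candidate; infer_instance

-- ===== CLAIM (what is proved, stated in full; the proofs are below) =====
def Claim_equal_obtain_best_candidate : Prop := ∀ (stat_rolls : List (List Int)), Dom_obtain_best_candidate stat_rolls → Spec_obtain_best_candidate stat_rolls (obtain_best_candidate stat_rolls)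

-- ===== LEMMAS AND PROOFS =====

-- keep-first strict-min combination on (remaining_sum, index) pairs
def obcBest (b e : Int × Int) : Int × Int := if e.1 < b.1 then e else b

-- A's lowest_remaining_sum update
def obcLo (o : Option Int) (rv : Int) : Option Int :=
  match o with
  | none => some rv
  | some v => if rv < v then some rv else some v

-- remaining sum A computes for one candidate list
def obcRem (p : Int × List Int) : Int :=
  ((PySem.List.sorted p.2 (fun x => x) false).dropLast).sum

lemma obcStep_none (l : List (Int × List Int)) (st : Option Int × List (Int × List Int) × List Int × List Int) :
    l.foldl (obcStep none) st = st := by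
  induction l generalizing st with
  | nil => rfl
  | cons p l ih => simpa [obcStep] using ih st

lemma obcLoop1_eq (m : Int) (l : List (Int × List Int)) :
    ∀ (lo : Option Int) (ob : List (Int × List Int)) (rs ix : List Int),
    l.foldl (obcStep (some m)) (lo, ob, rs, ix) =
      ( ((l.filter (fun p => decide (m ∈ p.2))).map obcRem).foldl obcLo lo,
        ob ++ l.filter (fun p => decide (m ∈ p.2)),
        rs ++ (l.filter (fun p => decide (m ∈ p.2))).map obcRem,
        ix ++ (l.filter (fun p => decide (m ∈ p.2))).map (·.1) ) := by
  induction l with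
  | nil => simp
  | cons p l ih =>
    intro lo ob rs ix
    by_cases hp : m ∈ p.2
    · have hd : (decide (m ∈ p.2)) = true := by simpa using hp
      simp only [List.foldl_cons, obcStep, PySem.Set.mem_ofList, hp, decide_true, if_true,
        ih]
      simp [obcRem, obcLo, hd]
    · have hd : ¬ ((decide (m ∈ p.2)) = true) := by simpa using hp
      simp [List.foldl_cons, obcStep, hp, ih, List.filter_cons_of_neg]

lemma obcLoop2_find (s : List (List Int)) (lo : Option Int) (full : List (Int × List Int)) :
    ∀ (q : List (Int × List Int)) (k : Nat), full.drop k = q →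
    obcLoop2 s (full.map obcRem) (full.map (·.1)) lo (PySem.List.enumerate q (k : Int)) =
      (q.find? (fun p => decide (some (obcRem p) = lo))).map
        (fun p => (p.1, PySem.List.pyGetD s p.1 [])) := by
  intro q
  induction q with
  | nil => intro k _; simp [PySem.List.enumerate_nil, obcLoop2]
  | cons p q ih =>
    intro k hk
    have hfk : full[k]? = some p := by
      have h0 : (full.drop k)[0]? = some p := by rw [hk]; rfl
      simpa using h0
    have h1 : PySem.List.pyGetD (full.map obcRem) (k : Int) 0 = obcRem p := by
      rw [PySem.List.pyGetD_natCast, List.getD_eq_getElem?_getD, List.getElem?_map, hfk]; rfl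
    have h2 : PySem.List.pyGetD (full.map (·.1)) (k : Int) 0 = p.1 := by
      rw [PySem.List.pyGetD_natCast, List.getD_eq_getElem?_getD, List.getElem?_map, hfk]; rfl
    have hk1 : full.drop (k + 1) = q := by rw [← List.tail_drop, hk]; rfl
    have hcast : ((k : Int) + 1) = ((k + 1 : Nat) : Int) := by push_cast; ring
    rw [PySem.List.enumerate_cons]
    by_cases hc : some (obcRem p) = lo
    · rw [List.find?_cons_of_pos (by simpa using hc)]
      simp [obcLoop2, h1, h2, hc]
    · rw [List.find?_cons_of_neg (by simpa using hc)]
      simp only [obcLoop2, h1, h2, hc, if_false, hcast]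
      exact ih (k + 1) hk1

lemma find?_congr_mem {α : Type} (l : List α) (f g : α → Bool) (h : ∀ x ∈ l, f x = g x) :
    l.find? f = l.find? g := by
  induction l with
  | nil => rfl
  | cons x l ih =>
    rcases hfx : f x with _ | _
    · rw [List.find?_cons_of_neg (by simp [hfx]), List.find?_cons_of_neg (by simp [← h x List.mem_cons_self, hfx])]
      exact ih (fun y hy => h y (List.mem_cons_of_mem x hy))
    · rw [List.find?_cons_of_pos (by simp [hfx]), List.find?_cons_of_pos (by simp [← h x List.mem_cons_self, hfx])]

lemma head?_insertBy (x : Int × Int) (ys : List (Int × Int)) :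
    (PySem.List.insertBy (fun a b => decide (a.1 < b.1)) x ys).head? =
      some (match ys.head? with | none => x | some y => if x.1 < y.1 then x else y) := by
  cases ys with
  | nil => simp [PySem.List.insertBy]
  | cons y t => by_cases h : x.1 < y.1 <;> simp [PySem.List.insertBy, h]

-- head of the running insertion sort = keep-first strict-min fold
lemma head?_foldl_insertBy (l : List (Int × Int)) :
    ∀ (acc : List (Int × Int)),
    (l.foldl (fun a x => PySem.List.insertBy (fun a b => decide (a.1 < b.1)) x a) acc).head? =
      l.foldl (fun o x => some (match o with | none => x | some b => if x.1 < b.1 then x else b)) acc.head? := by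
  induction l with
  | nil => intro acc; rfl
  | cons x l ih =>
    intro acc
    simp only [List.foldl_cons, ih, head?_insertBy]

lemma foldl_some_best (t : List (Int × Int)) :
    ∀ (x : Int × Int),
    t.foldl (fun o e => some (match o with | none => e | some b => if e.1 < b.1 then e else b)) (some x) =
      some (t.foldl obcBest x) := by
  induction t with
  | nil => intro x; rfl
  | cons y t ih => intro x; simp only [List.foldl_cons, ih, obcBest]

lemma best_fst_le (t : List (Int × Int)) : ∀ (x : Int × Int), (t.foldl obcBest x).1 ≤ x.1 := by
  induction t with
  | nil => intro x; exact le_rfl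
  | cons y t ih =>
    intro x
    refine le_trans (ih (obcBest x y)) ?_
    unfold obcBest; split <;> omega

-- the first element whose remaining sum equals the minimum IS the keep-first strict-min fold
lemma find?_best (t : List (Int × Int)) :
    ∀ (x : Int × Int),
    (x :: t).find? (fun e => decide (e.1 = (t.foldl obcBest x).1)) = some (t.foldl obcBest x) := by
  induction t with
  | nil => intro x; simp
  | cons y t ih =>
    intro x
    by_cases hxy : y.1 < x.1
    · have hb : obcBest x y = y := by simp [obcBest, hxy]
      have hlt : (t.foldl obcBest y).1 < x.1 := lt_of_le_of_lt (best_fst_le t y) hxy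
      rw [List.foldl_cons, hb, List.find?_cons_of_neg (by simp; omega)]
      exact ih y
    · have hb : obcBest x y = x := by simp [obcBest, hxy]
      have hle := best_fst_le t x
      by_cases hx : x.1 = (t.foldl obcBest x).1
      · have hxb : x = t.foldl obcBest x := by
          have := ih x
          rw [List.find?_cons_of_pos (by simpa using hx)] at this
          simpa using this
        rw [List.foldl_cons, hb, List.find?_cons_of_pos (by simpa using hx)]
        simp [← hxb]
      · have hyne : ¬ (y.1 = (t.foldl obcBest x).1) := by omega
        have := ih x
        rw [List.find?_cons_of_neg (by simpa using hx)] at this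
        rw [List.foldl_cons, hb, List.find?_cons_of_neg (by simpa using hx),
            List.find?_cons_of_neg (by simpa using hyne)]
        exact this

lemma foldl_lo_some (rs : List Int) :
    ∀ (v : Int), rs.foldl obcLo (some v) = some (rs.foldl (fun v rv => if rv < v then rv else v) v) := by
  induction rs with
  | nil => intro v; rfl
  | cons r rs ih => intro v; simp only [List.foldl_cons, obcLo]; split <;> simp [ih]

lemma best_fst_eq (t : List (Int × Int)) :
    ∀ (x : Int × Int), (t.foldl obcBest x).1 = (t.map Prod.fst).foldl (fun v rv => if rv < v then rv else v) x.1 := by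
  induction t with
  | nil => intro x; rfl
  | cons y t ih =>
    intro x
    simp only [List.foldl_cons, List.map_cons, ih, obcBest]
    split <;> rfl

-- A's remaining sum (sort a copy, delete the last, sum) = sum - m when m is the global max and m ∈ L
lemma rem_eq_sum_sub (L : List Int) (m : Int) (hmem : m ∈ L) (hmax : ∀ y ∈ L, y ≤ m) :
    ((PySem.List.sorted L (fun x => x) false).dropLast).sum = L.sum - m := by
  have hLne : L ≠ [] := List.ne_nil_of_mem hmem
  set sl := PySem.List.sorted L (fun x => x) false with hsl
  have hne : sl ≠ [] := by
    intro h; exact hLne ((PySem.List.sorted_eq_nil_iff L (fun x => x) false).mp h)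
  have hperm : sl.Perm L := PySem.List.sorted_perm L (fun x => x) false
  have hsum : sl.sum = L.sum := hperm.sum_eq
  have hsplit : sl.dropLast ++ [sl.getLast hne] = sl := List.dropLast_append_getLast hne
  have hg_le : sl.getLast hne ≤ m := hmax _ (hperm.mem_iff.mp (List.getLast_mem hne))
  have hm_sl : m ∈ sl := (PySem.List.mem_sorted L (fun x => x) false m).mpr hmem
  have hpw : sl.Pairwise (fun a b => a ≤ b) := PySem.List.sorted_pairwise L (fun x => x)
  have hle : m ≤ sl.getLast hne := by
    rw [← hsplit] at hm_sl hpw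
    rcases List.mem_append.mp hm_sl with h | h
    · exact (List.pairwise_append.mp hpw).2.2 m h _ (by simp)
    · simp only [List.mem_singleton] at h; omega
  have hdrop : sl.dropLast.sum + sl.getLast hne = sl.sum := by
    conv_rhs => rw [← hsplit]
    simp
  omega

-- ===== VERDICT (by name: the statement is the Claim_ definition above) =====
theorem obtain_best_candidate_spec : Claim_equal_obtain_best_candidate := by
  unfold Claim_equal_obtain_best_candidate
  intro s _
  unfold Spec_obtain_best_candidate
  have hmaster : new_master_list s = s.flatten := by
    simpa using PySem.List.foldl_append_eq_flatten s []
  by_cases hflat : s.flatten = []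
  · have hms : max_stat s = none := by
      rw [max_stat, hmaster, hflat]; rfl
    rw [obtain_best_candidate, obtain_best_candidate_alt]
    simp only [hms, obcStep_none, List.flatMap_id', hflat, PySem.List.enumerate_nil]
    rfl
  · obtain ⟨x, t, hxt⟩ := List.exists_cons_of_ne_nil hflat
    have hms' : PySem.List.max? s.flatten (fun y => y) = some (t.foldl max x) := by
      rw [hxt]; exact PySem.List.max?_id_cons x t
    set m := t.foldl max x with hmdef
    have hms : max_stat s = some m := by rw [max_stat, hmaster]; exact hms'
    have hmmem : m ∈ s.flatten := PySem.List.max?_mem hms'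
    have hmax : ∀ y ∈ s.flatten, y ≤ m := PySem.List.max?_isMax hms'
    set q := (PySem.List.enumerate s 0).filter (fun p => decide (m ∈ p.2)) with hqdef
    have hsnd : ∀ p ∈ q, m ∈ p.2 ∧ p.2 ∈ s := by
      intro p hp
      have h1 := List.of_mem_filter hp
      have h2 := List.mem_of_mem_filter hp
      refine ⟨by simpa using h1, ?_⟩
      obtain ⟨k, hk, rfl⟩ := (PySem.List.mem_enumerate_iff s 0 p).mp h2
      exact List.getElem_mem hk
    have hrem : ∀ p ∈ q, obcRem p = p.2.sum - m := by
      intro p hp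
      exact rem_eq_sum_sub p.2 m (hsnd p hp).1
        (fun y hy => hmax y (List.mem_flatten.mpr ⟨p.2, (hsnd p hp).2, hy⟩))
    have hqne : q ≠ [] := by
      obtain ⟨L, hLs, hmL⟩ := List.mem_flatten.mp hmmem
      obtain ⟨k, hk, rfl⟩ := List.getElem_of_mem hLs
      refine List.ne_nil_of_mem (a := ((0 : Int) + (k : Int), s[k])) ?_
      rw [hqdef]
      exact List.mem_filter.mpr ⟨(PySem.List.mem_enumerate_iff s 0 _).mpr ⟨k, hk, rfl⟩,
        by simpa using hmL⟩
    obtain ⟨p0, q1, hq⟩ := List.exists_cons_of_ne_nil hqne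
    set f : (Int × List Int) → (Int × Int) := fun p => (p.2.sum - m, p.1) with hfdef
    set b := (q1.map f).foldl obcBest (f p0) with hbdef
    have hloop1 := obcLoop1_eq m (PySem.List.enumerate s 0) none [] [] []
    have hA : obtain_best_candidate s =
        (q.find? (fun p => decide (some (obcRem p) = (q.map obcRem).foldl obcLo none))).map
          (fun p => (p.1, PySem.List.pyGetD s p.1 [])) := by
      rw [obtain_best_candidate]
      simp only [hms, hloop1, List.nil_append, ← hqdef]
      exact obcLoop2_find s _ q q 0 (by simp)
    have hmapq : q.map obcRem = q.map (fun p => p.2.sum - m) := List.map_congr_left hrem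
    have hlow : (q.map obcRem).foldl obcLo none = some b.1 := by
      rw [hmapq, hq]
      simp only [List.map_cons, List.foldl_cons]
      show (q1.map (fun p => p.2.sum - m)).foldl obcLo (some (f p0).1) = some b.1
      have hmm : q1.map (fun p => p.2.sum - m) = (q1.map f).map Prod.fst := by
        simp [hfdef, List.map_map]
      rw [hmm, foldl_lo_some, hbdef, best_fst_eq]
    have hfind : q.find? (fun p => decide (some (obcRem p) = (q.map obcRem).foldl obcLo none)) =
        q.find? (fun p => decide ((f p).1 = b.1)) := by
      apply find?_congr_mem
      intro p hp
      rw [hlow, hrem p hp]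
      simp [hfdef]
    have hfb := find?_best (q1.map f) (f p0)
    rw [← hbdef] at hfb
    have hqp : q.map f = f p0 :: q1.map f := by rw [hq, List.map_cons]
    have hmapfind : (q.find? (fun p => decide ((f p).1 = b.1))).map f = some b := by
      have hfm := List.find?_map (p := fun e => decide (e.1 = b.1)) (f := f) (l := q)
      rw [hqp, hfb] at hfm
      simpa [Function.comp] using hfm.symm
    obtain ⟨pstar, hps, hpsb⟩ : ∃ ps, q.find? (fun p => decide ((f p).1 = b.1)) = some ps ∧ f ps = b := by
      cases hfq : q.find? (fun p => decide ((f p).1 = b.1)) with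
      | none => rw [hfq] at hmapfind; simp at hmapfind
      | some p' => rw [hfq] at hmapfind; exact ⟨p', rfl, by simpa using hmapfind⟩
    have hBqual : (PySem.List.enumerate s 0).foldl
        (fun acc p => if m ∈ p.2 then acc ++ [(p.2.sum - m, p.1)] else acc) [] = q.map f := by
      rw [PySem.List.foldl_append_ite (p := fun p => m ∈ p.2) (f := f)]
      simp [hqdef]
    have hhead : (PySem.List.sorted (q.map f) (fun e => e.1) false).head? = some b := by
      rw [PySem.List.sorted_eq_foldl_insertBy, head?_foldl_insertBy, hqp]
      simp only [List.foldl_cons, List.head?_nil]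
      show (q1.map f).foldl _ (some (f p0)) = some b
      rw [foldl_some_best, hbdef]
    obtain ⟨rest, hsor⟩ : ∃ rest, PySem.List.sorted (q.map f) (fun e => e.1) false = b :: rest := by
      cases hs : PySem.List.sorted (q.map f) (fun e => e.1) false with
      | nil => rw [hs] at hhead; simp at hhead
      | cons b' rest =>
        rw [hs] at hhead
        simp only [List.head?_cons, Option.some.injEq] at hhead
        exact ⟨rest, by rw [hhead]⟩
    have hB : obtain_best_candidate_alt s = some (b.2, PySem.List.pyGetD s b.2 []) := by
      rw [obtain_best_candidate_alt]
      simp only [List.flatMap_id', hxt, ← hmdef, hBqual, hsor]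
    rw [hA, hfind, hps, hB]
    rw [← hpsb]
    simp [hfdef]
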